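-- pv_equiv track=rewrite | github.com/wangfaping0707/learningPythonProject | pac/bu/d93_数组分组.py | cal_add
-- ===== SOURCE A (Python) =====
-- def cal_add(sm3, sm5, other):
-- 	if len(other) == 0:
-- 		if sm3 == sm5:
-- 			return True
-- 		else:
-- 			return False
-- 	else:
-- 		return cal_add(sm3, sm5 + other[0], other[1:]) or cal_add(sm3 + other[0], sm5, other[1:])
-- ===== SOURCE B (Python) =====
-- def cal_add(sm3, sm5, other):
--     # DP over reachable differences sm5-sm3 instead of exponential recursion
--     diffs = {sm5 - sm3}
--     for x in other:
--         new = set()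
--         for d in diffs:
--             new.add(d + x)
--             new.add(d - x)
--         diffs = new
--     return 0 in diffs
-- ===== Notes on version B (the rewrite author's own statement) =====
-- stated objective: alternative
-- what changed: Replaced the branching recursion over both placements of each element by an iterative subset-sum DP maintaining the set of reachable differences sm5-sm3 and checking whether 0 is reachable; it trades the recursion for set bookkeeping and collapses duplicate partial sums.
import Mathlib
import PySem

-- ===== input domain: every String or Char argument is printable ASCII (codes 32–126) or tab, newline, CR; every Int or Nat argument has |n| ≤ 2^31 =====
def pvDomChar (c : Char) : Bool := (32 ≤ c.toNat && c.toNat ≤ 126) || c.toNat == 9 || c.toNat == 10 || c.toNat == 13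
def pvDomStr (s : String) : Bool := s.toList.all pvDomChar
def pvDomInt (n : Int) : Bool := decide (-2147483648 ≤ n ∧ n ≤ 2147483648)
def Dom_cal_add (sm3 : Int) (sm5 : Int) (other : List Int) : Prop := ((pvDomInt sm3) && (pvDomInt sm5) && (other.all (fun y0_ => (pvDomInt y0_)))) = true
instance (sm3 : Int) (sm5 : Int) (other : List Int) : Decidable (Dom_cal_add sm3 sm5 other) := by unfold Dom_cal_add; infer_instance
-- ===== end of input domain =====

-- B replaces A's branching recursion by an iterative DP over the set of reachable differences sm5-sm3 (an alternative algorithm; duplicate partial sums collapse).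


-- ===== PORT A =====
def cal_add (sm3 : Int) (sm5 : Int) (other : List Int) : Bool :=
  match other with
  | [] => if sm3 == sm5 then true else false
  | x :: rest => cal_add sm3 (sm5 + x) rest || cal_add (sm3 + x) sm5 rest

-- ===== PORT B =====
-- inner loop: for d in diffs: new.add(d + x); new.add(d - x)
def calAddStep (diffs : PySem.Set Int) (x : Int) : PySem.Set Int :=
  diffs.foldl (fun s d => PySem.Set.add (PySem.Set.add s (d + x)) (d - x)) PySem.Set.empty

def cal_add_alt (sm3 : Int) (sm5 : Int) (other : List Int) : Bool :=
  decide (0 ∈ other.foldl calAddStep (PySem.Set.ofList [sm5 - sm3]))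

-- ===== PRECONDITION & SPEC =====
def Spec_cal_add (sm3 : Int) (sm5 : Int) (other : List Int) (out : Bool) : Prop := out = cal_add_alt sm3 sm5 other
instance (sm3 : Int) (sm5 : Int) (other : List Int) (out : Bool) : Decidable (Spec_cal_add sm3 sm5 other out) := by unfold Spec_cal_add; infer_instance

-- ===== CLAIM (what is proved, stated in full; the proofs are below) =====
def Claim_equal_cal_add : Prop := ∀ (sm3 : Int) (sm5 : Int) (other : List Int), Dom_cal_add sm3 sm5 other → Spec_cal_add sm3 sm5 other (cal_add sm3 sm5 other)

-- ===== LEMMAS AND PROOFS =====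

-- proof-side recursion on the difference only
def calG (d : Int) : List Int → Bool
  | [] => d == 0
  | x :: rest => calG (d + x) rest || calG (d - x) rest

theorem cal_add_eq_calG (other : List Int) (sm3 sm5 : Int) :
    cal_add sm3 sm5 other = calG (sm5 - sm3) other := by
  induction other generalizing sm3 sm5 with
  | nil =>
    simp only [cal_add, calG]
    by_cases h : sm3 = sm5
    · simp [h]
    · have h2 : ¬ (sm5 - sm3 = 0) := by omega
      simp [h, h2]
  | cons x rest ih =>
    simp only [cal_add, calG, ih]
    congr 1 <;> congr 1 <;> omega

theorem mem_step_foldl (x y : Int) (l : List Int) (acc : PySem.Set Int) :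
    y ∈ l.foldl (fun s d => PySem.Set.add (PySem.Set.add s (d + x)) (d - x)) acc ↔
      y ∈ acc ∨ ∃ d ∈ l, y = d + x ∨ y = d - x := by
  induction l generalizing acc with
  | nil => simp
  | cons d rest ih =>
    simp only [List.foldl_cons, ih, PySem.Set.mem_add, List.mem_cons]
    constructor
    · rintro (((h | h) | h) | ⟨d', hd', h⟩)
      · exact Or.inl h
      · exact Or.inr ⟨d, Or.inl rfl, Or.inl h⟩
      · exact Or.inr ⟨d, Or.inl rfl, Or.inr h⟩
      · exact Or.inr ⟨d', Or.inr hd', h⟩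
    · rintro (h | ⟨d', (rfl | hd'), h⟩)
      · exact Or.inl (Or.inl (Or.inl h))
      · rcases h with h | h
        · exact Or.inl (Or.inl (Or.inr h))
        · exact Or.inl (Or.inr h)
      · exact Or.inr ⟨d', hd', h⟩

theorem mem_calAddStep (S : PySem.Set Int) (x y : Int) :
    y ∈ calAddStep S x ↔ ∃ d ∈ S, y = d + x ∨ y = d - x := by
  unfold calAddStep
  rw [mem_step_foldl]
  simp [PySem.Set.empty]

theorem zero_mem_foldl_iff (l : List Int) (S : PySem.Set Int) :
    0 ∈ l.foldl calAddStep S ↔ ∃ d ∈ S, calG d l = true := by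
  induction l generalizing S with
  | nil =>
    simp only [List.foldl_nil, calG, beq_iff_eq]
    constructor
    · intro h; exact ⟨0, h, rfl⟩
    · rintro ⟨d, hd, rfl⟩; exact hd
  | cons x rest ih =>
    simp only [List.foldl_cons, ih]
    constructor
    · rintro ⟨d', hd', h⟩
      rw [mem_calAddStep] at hd'
      rcases hd' with ⟨d, hd, rfl | rfl⟩ <;>
        exact ⟨d, hd, by simp [calG, h]⟩
    · rintro ⟨d, hd, h⟩
      simp only [calG, Bool.or_eq_true] at h
      rcases h with h | h
      · exact ⟨d + x, (mem_calAddStep S x (d + x)).2 ⟨d, hd, Or.inl rfl⟩, h⟩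
      · exact ⟨d - x, (mem_calAddStep S x (d - x)).2 ⟨d, hd, Or.inr rfl⟩, h⟩

-- ===== VERDICT (by name: the statement is the Claim_ definition above) =====
theorem cal_add_spec : Claim_equal_cal_add := by
  intro sm3 sm5 other _
  unfold Spec_cal_add cal_add_alt
  rw [cal_add_eq_calG]
  have h := zero_mem_foldl_iff other (PySem.Set.ofList [sm5 - sm3])
  simp only [PySem.Set.mem_ofList, List.mem_singleton] at h
  by_cases hg : calG (sm5 - sm3) other = true
  · simp [hg, h.2 ⟨sm5 - sm3, rfl, hg⟩]
  · have : ¬ (0 ∈ other.foldl calAddStep (PySem.Set.ofList [sm5 - sm3])) := by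
      intro hm
      rcases h.1 hm with ⟨d, rfl, hd⟩
      exact hg hd
    simp [Bool.eq_false_iff.2 hg, this]
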